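-- pv_equiv track=rewrite | github.com/jkoch830/Build-A-Melody | oldPythonSrc/TermProject.py | isValidChordProgression
-- ===== SOURCE A (Python) =====
-- def isValidChordProgression(chordProgression):
--     try:
--         for i in range(len(chordProgression)):
--             if chordProgression[i] == ",":
--                 if chordProgression[i + 1] != " ":
--                     return False
--         for char in chordProgression.split(", "):
--             if char not in ['I', 'II', 'III', 'IV', 'V', 'VI', 'VII', 'i',
--                                         'ii', 'iii', 'iv', 'v', 'vi', 'vii']:
--                 return False
--         return True
--     except:
--         return False
-- ===== SOURCE B (Python) =====
-- # Greedy single-pass token parser: consume one roman-numeral token at a time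
-- # (longest first), requiring a comma-space separator between tokens; replaces A's comma-scan pass
-- # plus split-and-membership pass.
-- TOKENS = ('III', 'VII', 'iii', 'vii', 'II', 'IV', 'VI', 'ii', 'iv', 'vi',
--           'I', 'V', 'i', 'v')
--
--
-- def isValidChordProgression(chordProgression):
--     try:
--         s = chordProgression
--         while True:
--             rest = None
--             for t in TOKENS:
--                 if s.startswith(t):
--                     rest = s[len(t):]
--                     break
--             if rest is None:
--                 return False
--             if rest == "":
--                 return True
--             if not rest.startswith(", "):
--                 return False
--             s = rest[2:]
--     except Exception:
--         return False
-- ===== Notes on version B (the rewrite author's own statement) =====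
-- stated objective: faster
-- what changed: Replaces A's two imperative passes (comma-space index scan, then split on the comma-space separator plus a membership check of every piece) by a single greedy longest-first token parser that consumes one roman-numeral token at a time and requires the comma-space separator between tokens; A's first scan is proved redundant.
import Mathlib
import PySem

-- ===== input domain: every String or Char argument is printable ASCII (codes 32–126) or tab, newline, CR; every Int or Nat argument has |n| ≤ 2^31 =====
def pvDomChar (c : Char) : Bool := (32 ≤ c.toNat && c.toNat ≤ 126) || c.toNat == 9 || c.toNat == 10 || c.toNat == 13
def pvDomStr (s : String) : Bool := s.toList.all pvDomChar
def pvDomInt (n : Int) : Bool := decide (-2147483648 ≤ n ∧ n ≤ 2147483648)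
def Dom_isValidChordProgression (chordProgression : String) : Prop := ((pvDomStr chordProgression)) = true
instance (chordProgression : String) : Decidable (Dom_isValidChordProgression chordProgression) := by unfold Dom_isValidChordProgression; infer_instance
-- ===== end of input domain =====

-- B replaces A's two passes (comma-space scan + split-and-check-membership) by one greedy
-- longest-first token parse (objective: faster; a timing run measured B faster at large sizes).

-- ===== PORT A =====
-- A's token list, in A's order (strings as lists of chars; Python str equality = list-of-chars equality)
def pvTokensA : List (List Char) :=
  [['I'], ['I','I'], ['I','I','I'], ['I','V'], ['V'], ['V','I'], ['V','I','I'],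
   ['i'], ['i','i'], ['i','i','i'], ['i','v'], ['v'], ['v','i'], ['v','i','i']]

-- `for i in range(len(cs)): if cs[i] == ',': if cs[i+1] != ' ': return False` — the
-- out-of-range read cs[i+1] raises IndexError, caught by A's bare `except` → False.
def aLoop (cs : List Char) (i : Nat) : Bool :=
  if i < cs.length then
    match PySem.List.pyGet? cs (i : Int) with
    | none => false  -- unreachable: i < len
    | some c =>
      if c = ',' then
        match PySem.List.pyGet? cs ((i : Int) + 1) with
        | none => false  -- IndexError → except → False
        | some d => if d ≠ ' ' then false else aLoop cs (i + 1)
      else aLoop cs (i + 1)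
  else true
termination_by cs.length - i

-- `.split(", ")` with a nonempty separator is PySem.Chars.splitOn; the second loop
-- returns False on the first piece not in the list, else True = `.all`.
def isValidChordProgression (chordProgression : String) : Bool :=
  if aLoop chordProgression.toList 0 then
    (PySem.Chars.splitOn chordProgression.toList [',', ' ']).all
      (fun t => pvTokensA.contains t)
  else false

-- ===== PORT B =====
-- Source B's TOKENS tuple, same order (3-char tokens first, then 2, then 1)
def pvTokensB : List (List Char) :=
  [['I','I','I'], ['V','I','I'], ['i','i','i'], ['v','i','i'],
   ['I','I'], ['I','V'], ['V','I'], ['i','i'], ['i','v'], ['v','i'],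
   ['I'], ['V'], ['i'], ['v']]

-- `for t in TOKENS: if s.startswith(t): rest = s[len(t):]; break`
def bFirst : List (List Char) → List Char → Option (List Char)
  | [], _ => none
  | t :: ts, s => if t.isPrefixOf s then some (s.drop t.length) else bFirst ts s

-- Source B's `while True` loop; fuel only makes it total (each pass strictly shortens s,
-- so `length + 1` fuel never runs out).
def bLoop : Nat → List Char → Bool
  | 0, _ => false
  | fuel + 1, s =>
    match bFirst pvTokensB s with
    | none => false
    | some rest =>
      if rest.isEmpty then true
      else if [',', ' '].isPrefixOf rest then bLoop fuel (rest.drop 2)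
      else false

def isValidChordProgression_alt (chordProgression : String) : Bool :=
  bLoop (chordProgression.toList.length + 1) chordProgression.toList

-- ===== PRECONDITION & SPEC =====
def Spec_isValidChordProgression (chordProgression : String) (out : Bool) : Prop := out = isValidChordProgression_alt chordProgression
instance (chordProgression : String) (out : Bool) : Decidable (Spec_isValidChordProgression chordProgression out) := by unfold Spec_isValidChordProgression; infer_instance

-- ===== CLAIM (what is proved, stated in full; the proofs are below) =====
def Claim_equal_isValidChordProgression : Prop := ∀ (chordProgression : String), Dom_isValidChordProgression chordProgression → Spec_isValidChordProgression chordProgression (isValidChordProgression chordProgression)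

-- ===== LEMMAS AND PROOFS =====

-- a clean structural model of `.split(", ")`
def mySplit : List Char → List (List Char)
  | [] => [[]]
  | c :: rest =>
    if c = ',' ∧ rest.head? = some ' ' then [] :: mySplit rest.tail
    else
      match mySplit rest with
      | [] => [[c]]  -- unreachable
      | p :: ps => (c :: p) :: ps
termination_by cs => cs.length
decreasing_by
  all_goals simp

def myJoin : List (List Char) → List Char
  | [] => []
  | [p] => p
  | p :: ps => p ++ ',' :: ' ' :: myJoin ps

theorem mySplit_shape : ∀ cs, ∃ p ps, mySplit cs = p :: ps := by
  intro cs
  cases cs with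
  | nil => exact ⟨[], [], by rw [mySplit]⟩
  | cons c rest =>
    rw [mySplit]
    by_cases h : c = ',' ∧ rest.head? = some ' '
    · simp [h]
    · simp only [if_neg h]
      rcases hm : mySplit rest with _ | ⟨p, ps⟩ <;> simp

theorem prefix_comma_space (c : Char) (rest : List Char) :
    [',', ' '].isPrefixOf (c :: rest) = true ↔ (c = ',' ∧ rest.head? = some ' ') := by
  cases rest with
  | nil => simp [List.isPrefixOf]
  | cons d r =>
    simp [List.isPrefixOf]
    constructor
    · rintro ⟨h1, h2⟩; exact ⟨h1.symm, h2.symm⟩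
    · rintro ⟨h1, h2⟩; exact ⟨h1.symm, h2.symm⟩

theorem go_eq_mySplit : ∀ (fuel : Nat) (l cur : List Char) (accs : List (List Char)) (p : List Char) (ps : List (List Char)),
    l.length < fuel → mySplit l = p :: ps →
    PySem.Chars.splitOn.go [',', ' '] fuel l cur accs = accs.reverse ++ (cur.reverse ++ p) :: ps := by
  intro fuel
  induction fuel with
  | zero => intro l cur accs p ps h _; omega
  | succ f ih =>
    intro l cur accs p ps hf hm
    cases l with
    | nil =>
      rw [mySplit] at hm
      obtain ⟨rfl, rfl⟩ : p = [] ∧ ps = [] := by injection hm with h1 h2; exact ⟨h1.symm, h2.symm⟩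
      simp [PySem.Chars.splitOn.go]
    | cons c rest =>
      by_cases hp : [',', ' '].isPrefixOf (c :: rest) = true
      · obtain ⟨hc, hh⟩ := (prefix_comma_space c rest).mp hp
        cases rest with
        | nil => simp at hh
        | cons d r =>
          have hd : d = ' ' := by simpa using hh
          subst hc; subst hd
          obtain ⟨p2, ps2, h2⟩ := mySplit_shape r
          have hm' : mySplit (',' :: ' ' :: r) = [] :: p2 :: ps2 := by
            rw [mySplit]; simp [h2]
          rw [hm'] at hm
          obtain ⟨rfl, rfl⟩ : p = [] ∧ ps = p2 :: ps2 := by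
            injection hm with h1 h2'; exact ⟨h1.symm, h2'.symm⟩
          have hlen : r.length < f := by simp at hf; omega
          rw [PySem.Chars.splitOn.go]
          simp only [hp, if_pos]
          rw [show (([',', ' '] : List Char).length) = 2 from rfl]
          rw [show (List.drop 2 (',' :: ' ' :: r)) = r from rfl]
          rw [ih r [] ((cur.reverse) :: accs) p2 ps2 hlen h2]
          simp
      · have hcond : ¬ (c = ',' ∧ rest.head? = some ' ') := fun h => hp ((prefix_comma_space c rest).mpr h)
        obtain ⟨p', ps', h'⟩ := mySplit_shape rest
        have hm' : mySplit (c :: rest) = (c :: p') :: ps' := by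
          rw [mySplit]; simp only [if_neg hcond, h']
        rw [hm'] at hm
        obtain ⟨rfl, rfl⟩ : p = c :: p' ∧ ps = ps' := by
          injection hm with h1 h2'; exact ⟨h1.symm, h2'.symm⟩
        have hlen : rest.length < f := by simp at hf; omega
        rw [PySem.Chars.splitOn.go]
        simp only [hp, Bool.false_eq_true, if_false]
        rw [ih rest (c :: cur) accs _ _ hlen h']
        simp

theorem splitOn_eq_mySplit (cs : List Char) :
    PySem.Chars.splitOn cs [',', ' '] = mySplit cs := by
  obtain ⟨p, ps, h⟩ := mySplit_shape cs
  rw [PySem.Chars.splitOn, go_eq_mySplit (cs.length + 1) cs [] [] p ps (by omega) h, h]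
  simp

theorem myJoin_mySplit : ∀ cs, myJoin (mySplit cs) = cs := by
  intro cs
  fun_induction mySplit cs with
  | case1 => rfl
  | case2 c rest h ih =>
    obtain ⟨hc, hh⟩ := h
    cases rest with
    | nil => simp at hh
    | cons d r =>
      have hd : d = ' ' := by simpa using hh
      subst hc; subst hd
      obtain ⟨p, ps, h2⟩ := mySplit_shape r
      simp only [List.tail_cons] at ih ⊢
      rw [h2] at ih ⊢
      rw [myJoin, ih]
      · simp
      · simp
  | case3 c rest h hm => exact absurd hm (by obtain ⟨p, ps, h2⟩ := mySplit_shape rest; simp [h2])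
  | case4 c rest h p ps hm ih =>
    rw [hm] at ih
    cases ps with
    | nil => rw [myJoin] at ih ⊢; rw [ih]
    | cons q ps' =>
      rw [myJoin] at ih
      rw [myJoin, ← ih]
      all_goals simp

theorem first_piece_prefix {cs p : List Char} {ps : List (List Char)}
    (h : mySplit cs = p :: ps) : p <+: cs := by
  have hj := myJoin_mySplit cs
  rw [h] at hj
  cases ps with
  | nil => rw [myJoin] at hj; exact hj ▸ List.prefix_refl p
  | cons q ps' =>
    rw [myJoin] at hj
    · exact ⟨',' :: ' ' :: myJoin (q :: ps'), hj⟩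
    · simp

theorem mySplit_append_noComma : ∀ (t l p : List Char) (ps : List (List Char)),
    ',' ∉ t → mySplit l = p :: ps → mySplit (t ++ l) = (t ++ p) :: ps := by
  intro t
  induction t with
  | nil => intro l p ps _ h; simpa using h
  | cons c t' ih =>
    intro l p ps hnc h
    have hc : c ≠ ',' := by intro hc; exact hnc (hc ▸ List.mem_cons_self ..)
    have hcond : ¬ (c = ',' ∧ (t' ++ l).head? = some ' ') := fun hh => hc hh.1
    have h' := ih l p ps (fun hm => hnc (List.mem_cons_of_mem _ hm)) h
    show mySplit (c :: (t' ++ l)) = ((c :: t') ++ p) :: ps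
    rw [mySplit]
    simp only [if_neg hcond, h']
    rfl

theorem mySplit_noComma (t : List Char) (h : ',' ∉ t) : mySplit t = [t] := by
  have := mySplit_append_noComma t [] [] [] h (by rw [mySplit])
  simpa using this

theorem mySplit_sep (t r : List Char) (h : ',' ∉ t) :
    mySplit (t ++ ',' :: ' ' :: r) = t :: mySplit r := by
  obtain ⟨p, ps, h2⟩ := mySplit_shape r
  have hl : mySplit (',' :: ' ' :: r) = [] :: p :: ps := by rw [mySplit]; simp [h2]
  rw [mySplit_append_noComma t _ [] (p :: ps) h hl, h2]
  simp

-- A's first loop, as a structural scan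
def aScan : List Char → Bool
  | [] => true
  | c :: rest =>
    if c = ',' then
      match rest.head? with
      | none => false
      | some d => if d = ' ' then aScan rest else false
    else aScan rest

theorem aLoop_eq_aScan : ∀ (k : Nat) (cs : List Char) (i : Nat),
    cs.length - i ≤ k → aLoop cs i = aScan (cs.drop i) := by
  intro k
  induction k with
  | zero =>
    intro cs i h
    have hi : cs.length ≤ i := by omega
    rw [aLoop]
    simp [if_neg (by omega : ¬ i < cs.length), List.drop_eq_nil_of_le hi, aScan]
  | succ n ih =>
    intro cs i h
    by_cases hi : i < cs.length
    · rw [aLoop]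
      simp only [if_pos hi]
      have hg : PySem.List.pyGet? cs (i : Int) = some cs[i] := by
        rw [PySem.List.pyGet?_natCast]
        exact List.getElem?_eq_getElem hi
      rw [hg]
      have hdrop : cs.drop i = cs[i] :: cs.drop (i + 1) := (List.getElem_cons_drop hi).symm
      rw [hdrop, aScan]
      have hg2 : PySem.List.pyGet? cs ((i : Int) + 1) = cs[i + 1]? := by
        rw [show ((i : Int) + 1) = ((i + 1 : Nat) : Int) by push_cast; ring,
          PySem.List.pyGet?_natCast]
      have hh : (cs.drop (i + 1)).head? = cs[i + 1]? := List.head?_drop ..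
      by_cases hc : cs[i] = ','
      · simp only [if_pos hc, hg2, ← hh]
        cases hd : (cs.drop (i + 1)).head? with
        | none => rfl
        | some d =>
          by_cases hsp : d = ' '
          · simp [hsp, ih cs (i + 1) (by omega)]
          · simp [hsp]
      · simp only [if_neg hc]
        exact ih cs (i + 1) (by omega)
    · rw [aLoop]
      simp [if_neg hi, List.drop_eq_nil_of_le (by omega : cs.length ≤ i), aScan]

theorem aScan_append_noComma : ∀ (t l : List Char), ',' ∉ t → aScan (t ++ l) = aScan l := by
  intro t
  induction t with
  | nil => intro l _; rfl
  | cons c t' ih =>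
    intro l hnc
    have hc : c ≠ ',' := by intro hc; exact hnc (hc ▸ List.mem_cons_self ..)
    show aScan (c :: (t' ++ l)) = aScan l
    rw [aScan]
    simp only [if_neg hc]
    exact ih l (fun hm => hnc (List.mem_cons_of_mem _ hm))

-- concrete facts about the token lists
theorem tokensB_noComma : ∀ t ∈ pvTokensB, ',' ∉ t := by decide
theorem tokensB_ne_nil : ∀ t ∈ pvTokensB, t ≠ [] := by decide
theorem tokensB_sorted : List.Pairwise (fun a b : List Char => b.length ≤ a.length) pvTokensB := by decide
theorem tokensAB_perm : pvTokensA.Perm pvTokensB := by decide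

theorem containsA_eq_containsB (p : List Char) : pvTokensA.contains p = pvTokensB.contains p := by
  apply Bool.eq_iff_iff.mpr
  simp only [List.contains_iff_mem]
  exact tokensAB_perm.mem_iff

theorem aScan_join_tokens : ∀ ps : List (List Char), (∀ p ∈ ps, p ∈ pvTokensB) →
    aScan (myJoin ps) = true := by
  intro ps
  fun_induction myJoin ps with
  | case1 => intro _; rfl
  | case2 p =>
    intro h
    have hnc := tokensB_noComma p (h p (List.mem_cons_self ..))
    have h2 : aScan (p ++ []) = aScan [] := aScan_append_noComma p [] hnc
    simpa using h2
  | case3 p q ps' ih =>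
    intro h
    have hnc := tokensB_noComma p (h p (List.mem_cons_self ..))
    rw [aScan_append_noComma p _ hnc]
    rw [aScan]
    simp only [List.head?_cons, if_pos]
    rw [aScan]
    simp only [if_neg (by decide : ¬ (' ' = ','))]
    exact ih (fun r hr => h r (List.mem_cons_of_mem _ hr))

-- bFirst: soundness + longest-match (thanks to the length-sorted token order)
theorem bFirst_none {ts : List (List Char)} {s : List Char}
    (h : bFirst ts s = none) : ∀ t ∈ ts, ¬ t <+: s := by
  induction ts with
  | nil => intro t ht; simp at ht
  | cons u ts' ih =>
    rw [bFirst] at h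
    by_cases hp : u.isPrefixOf s = true
    · rw [if_pos hp] at h; exact absurd h (by simp)
    · rw [if_neg hp] at h
      intro t ht
      rcases List.mem_cons.mp ht with rfl | ht'
      · exact fun hpre => hp (List.isPrefixOf_iff_prefix.mpr hpre)
      · exact ih h t ht'

theorem bFirst_max : ∀ (ts : List (List Char)) (s r : List Char),
    List.Pairwise (fun a b : List Char => b.length ≤ a.length) ts →
    bFirst ts s = some r →
    ∃ t, t ∈ ts ∧ t <+: s ∧ r = s.drop t.length ∧
      ∀ t' ∈ ts, t' <+: s → t'.length ≤ t.length := by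
  intro ts
  induction ts with
  | nil => intro s r _ h; simp [bFirst] at h
  | cons u ts' ih =>
    intro s r hpw h
    rw [bFirst] at h
    by_cases hp : u.isPrefixOf s = true
    · rw [if_pos hp] at h
      refine ⟨u, List.mem_cons_self .., List.isPrefixOf_iff_prefix.mp hp, by injection h with h; exact h.symm, ?_⟩
      intro t' ht' _
      rcases List.mem_cons.mp ht' with rfl | ht'
      · exact le_refl _
      · exact (List.pairwise_cons.mp hpw).1 t' ht'
    · rw [if_neg hp] at h
      obtain ⟨t, htmem, htpre, htr, hmax⟩ := ih s r (List.pairwise_cons.mp hpw).2 h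
      refine ⟨t, List.mem_cons_of_mem _ htmem, htpre, htr, ?_⟩
      intro t' ht' hpre'
      rcases List.mem_cons.mp ht' with rfl | ht'
      · exact absurd (List.isPrefixOf_iff_prefix.mpr hpre') hp
      · exact hmax t' ht' hpre'

theorem bFirst_length : ∀ (ts : List (List Char)) (s r : List Char),
    (∀ t ∈ ts, t ≠ []) → bFirst ts s = some r → r.length < s.length := by
  intro ts
  induction ts with
  | nil => intro s r _ h; simp [bFirst] at h
  | cons u ts' ih =>
    intro s r hne h
    rw [bFirst] at h
    by_cases hp : u.isPrefixOf s = true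
    · rw [if_pos hp] at h
      have hu : u ≠ [] := hne u (List.mem_cons_self ..)
      have hlen : u.length ≤ s.length := (List.isPrefixOf_iff_prefix.mp hp).length_le
      have h1 : 1 ≤ u.length := List.length_pos_iff.mpr hu
      injection h with h
      rw [← h]
      simp only [List.length_drop]
      omega
    · rw [if_neg hp] at h
      exact ih s r (fun t ht => hne t (List.mem_cons_of_mem _ ht)) h

theorem bLoop_fuel : ∀ (f g : Nat) (s : List Char),
    s.length < f → s.length < g → bLoop f s = bLoop g s := by
  intro f
  induction f with
  | zero => intro g s h _; omega
  | succ f' ih =>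
    intro g s hf hg
    cases g with
    | zero => omega
    | succ g' =>
      rw [bLoop, bLoop]
      cases hb : bFirst pvTokensB s with
      | none => rfl
      | some rest =>
        have hlen : rest.length < s.length := bFirst_length pvTokensB s rest tokensB_ne_nil hb
        by_cases he : rest.isEmpty
        · simp [he]
        · simp only [he, Bool.false_eq_true, if_false]
          by_cases hpre : [',', ' '].isPrefixOf rest = true
          · simp only [if_pos hpre]
            have hd : (rest.drop 2).length < f' := by simp; omega
            have hd2 : (rest.drop 2).length < g' := by simp; omega
            exact ih g' (rest.drop 2) hd hd2
          · simp [hpre]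

-- the main characterisation of B
theorem bLoop_eq_all : ∀ (k : Nat) (cs : List Char), cs.length ≤ k →
    bLoop (cs.length + 1) cs = (mySplit cs).all (fun p => pvTokensB.contains p) := by
  intro k
  induction k with
  | zero =>
    intro cs h
    have hnil : cs = [] := List.length_eq_zero_iff.mp (by omega)
    subst hnil
    rw [show mySplit [] = [[]] from by rw [mySplit]]
    decide
  | succ n ih =>
    intro cs hk
    rw [bLoop]
    cases hb : bFirst pvTokensB cs with
    | none =>
      obtain ⟨p, ps, hm⟩ := mySplit_shape cs
      have hpre : p <+: cs := first_piece_prefix hm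
      have hnp : p ∉ pvTokensB := fun hmem => bFirst_none hb p hmem hpre
      rw [hm]
      simp [hnp]
    | some rest =>
      obtain ⟨t, htmem, htpre, hrest, hmax⟩ := bFirst_max pvTokensB cs rest tokensB_sorted hb
      obtain ⟨u, rfl⟩ := htpre
      have hu : rest = u := by rw [hrest, List.drop_left]
      subst hu
      have hnct := tokensB_noComma t htmem
      by_cases he : rest.isEmpty
      · have hre : rest = [] := List.isEmpty_iff.mp he
        subst hre
        simp only [List.isEmpty_nil, if_pos]
        rw [List.append_nil, mySplit_noComma t hnct]
        simp [htmem]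
      · simp only [he, Bool.false_eq_true, if_false]
        by_cases hpre2 : [',', ' '].isPrefixOf rest = true
        · obtain ⟨r, rfl⟩ : ∃ r, rest = ',' :: ' ' :: r := by
            obtain ⟨r, hr⟩ := List.isPrefixOf_iff_prefix.mp hpre2
            exact ⟨r, hr.symm⟩
          simp only [if_pos hpre2]
          rw [show ((',' :: ' ' :: r).drop 2) = r from rfl]
          have htne : t ≠ [] := tokensB_ne_nil t htmem
          have htpos : 1 ≤ t.length := List.length_pos_iff.mpr htne
          have hlr : r.length < (t ++ ',' :: ' ' :: r).length := by simp; omega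
          rw [bLoop_fuel ((t ++ ',' :: ' ' :: r).length) (r.length + 1) r hlr (by omega)]
          rw [ih r (by simp at hk; omega)]
          rw [mySplit_sep t r hnct]
          simp [htmem]
        · simp only [hpre2, Bool.false_eq_true, if_false]
          cases rest with
          | nil => simp at he
          | cons c r' =>
            obtain ⟨p0, ps0, h0⟩ := mySplit_shape r'
            by_cases hc : c = ','
            · subst hc
              have hcond : ¬ ((',' : Char) = ',' ∧ r'.head? = some ' ') := by
                rintro ⟨-, hh⟩
                exact hpre2 ((prefix_comma_space ',' r').mpr ⟨rfl, hh⟩)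
              have hm' : mySplit (',' :: r') = (',' :: p0) :: ps0 := by
                rw [mySplit, if_neg hcond, h0]
              rw [mySplit_append_noComma t _ _ _ hnct hm']
              have hns : (t ++ ',' :: p0) ∉ pvTokensB := by
                intro hmem
                exact tokensB_noComma _ hmem (by simp)
              simp [hns]
            · have hcond : ¬ (c = ',' ∧ r'.head? = some ' ') := fun hh => hc hh.1
              have hm' : mySplit (c :: r') = (c :: p0) :: ps0 := by
                rw [mySplit]; simp only [if_neg hcond, h0]
              rw [mySplit_append_noComma t _ _ _ hnct hm']
              have hns : (t ++ c :: p0) ∉ pvTokensB := by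
                intro hmem
                have hpp : (c :: p0) <+: (c :: r') := first_piece_prefix hm'
                have hfull : (t ++ c :: p0) <+: (t ++ c :: r') :=
                  (List.prefix_append_right_inj t).mpr hpp
                have hlen := hmax (t ++ c :: p0) hmem hfull
                simp at hlen
              simp [hns]

-- A's first loop is redundant once every piece is a token
theorem all_imp_aScan (cs : List Char)
    (h : (mySplit cs).all (fun p => pvTokensB.contains p) = true) : aScan cs = true := by
  have hmem : ∀ p ∈ mySplit cs, p ∈ pvTokensB := by
    intro p hp
    have := List.all_eq_true.mp h p hp
    simpa [List.contains_iff_mem] using this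
  conv_lhs => rw [← myJoin_mySplit cs]
  exact aScan_join_tokens _ hmem

-- ===== VERDICT (by name: the statement is the Claim_ definition above) =====
theorem isValidChordProgression_spec : Claim_equal_isValidChordProgression := by
  intro s _dom
  unfold Spec_isValidChordProgression isValidChordProgression isValidChordProgression_alt
  rw [aLoop_eq_aScan s.toList.length s.toList 0 (by omega), List.drop_zero,
    splitOn_eq_mySplit, bLoop_eq_all s.toList.length s.toList le_rfl]
  have hAB : (mySplit s.toList).all (fun t => pvTokensA.contains t)
      = (mySplit s.toList).all (fun p => pvTokensB.contains p) := by
    apply Bool.eq_iff_iff.mpr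
    simp only [List.all_eq_true]
    constructor
    · intro h p hp; rw [← containsA_eq_containsB]; exact h p hp
    · intro h p hp; rw [containsA_eq_containsB]; exact h p hp
  rw [hAB]
  by_cases hall : (mySplit s.toList).all (fun p => pvTokensB.contains p) = true
  · rw [all_imp_aScan s.toList hall, if_pos rfl]
  · have hf : (mySplit s.toList).all (fun p => pvTokensB.contains p) = false :=
      Bool.not_eq_true _ ▸ Bool.eq_false_iff.mpr hall
    rw [hf]
    cases hsc : aScan s.toList <;> simp
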